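-- pv_equiv track=rewrite | github.com/sururuu/TIL | Baekjoon_Algorithm/1407_2로 몇 번 나누어질까.py | solve
-- ===== SOURCE A (Python) =====
-- def solve(n):
--     ans, temp = 0, 1
--     while n:
--         if n % 2 == 0:
--             ans += (n//2)*temp
--         else:
--             ans += (n//2+1)*temp
--         n //= 2
--         temp *= 2
--     return ans
-- ===== SOURCE B (Python) =====
-- def solve(n):
--     # Exchange the order of summation: sum_i ceil(n/2^(i+1))*2^i counts each
--     # binary digit of n once per position below it, which collapses to the
--     # per-bit closed form  f(n) = n + sum over set bit positions j of j*2^(j-1).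
--     # So: read off n's binary digits once (LSB first) and add each bit's
--     # closed-form contribution; no halving loop, no running power accumulator.
--     total = n
--     for j, b in enumerate(bin(n)[:1:-1]):
--         if b == '1':
--             total += j * (1 << j) >> 1
--     return total
-- ===== Notes on version B (the rewrite author's own statement) =====
-- stated objective: alternative
-- what changed: Exchanges the order of summation: instead of A's halving loop with a parity branch and a doubling multiplier, B reads n's binary digits once and adds each set bit's closed-form contribution j*2^(j-1) on top of n.
import Mathlib
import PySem

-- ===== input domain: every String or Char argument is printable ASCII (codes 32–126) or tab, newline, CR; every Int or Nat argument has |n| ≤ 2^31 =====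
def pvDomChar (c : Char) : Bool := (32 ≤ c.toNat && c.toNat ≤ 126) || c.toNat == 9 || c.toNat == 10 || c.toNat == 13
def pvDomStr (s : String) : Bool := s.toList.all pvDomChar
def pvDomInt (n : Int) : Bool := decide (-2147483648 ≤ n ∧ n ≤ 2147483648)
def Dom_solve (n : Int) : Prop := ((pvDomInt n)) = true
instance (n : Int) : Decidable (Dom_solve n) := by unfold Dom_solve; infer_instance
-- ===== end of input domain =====

-- B exchanges the summation order: it reads n's binary digits once and adds each set
-- bit's closed-form contribution j*2^(j-1) on top of n (objective: alternative).

-- ===== PORT A =====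
-- A's while loop; the `n ≤ 0` stop is for Lean totality only: Pre_solve restricts to
-- 0 ≤ n, where the stop coincides with Python's `while n` (negative n loops forever in Python).
def solveLoopA (n ans temp : Int) : Int :=
  if h : n ≤ 0 then ans
  else
    solveLoopA (PySem.Int.floordiv n 2)
      (if PySem.Int.mod n 2 = 0 then ans + (PySem.Int.floordiv n 2) * temp
       else ans + (PySem.Int.floordiv n 2 + 1) * temp)
      (temp * 2)
  termination_by n.toNat
  decreasing_by
    have h2 : PySem.Int.floordiv n 2 = n / 2 := PySem.Int.floordiv_eq_ediv_of_pos (by omega)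
    rw [h2]; simp; omega

def solve (n : Int) : Int := solveLoopA n 0 1

-- ===== PORT B =====
-- bin(n)[:1:-1] for n ≥ 0: n's binary digit characters, least significant first
-- (bin(0)[:1:-1] = "0"); exact on Pre_solve (0 ≤ n).
def pyBinLSB (n : Int) : List Char :=
  if n ≤ 0 then []
  else (if PySem.Int.mod n 2 = 1 then '1' else '0') :: pyBinLSB (PySem.Int.floordiv n 2)
  termination_by n.toNat
  decreasing_by
    have h2 : PySem.Int.floordiv n 2 = n / 2 := PySem.Int.floordiv_eq_ediv_of_pos (by omega)
    rw [h2]; simp; omega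

-- the `for j, b in enumerate(...)` loop; `1 << j` is ported as `2 ^ j` and `>> 1`
-- as `/ 2` (exact: j * 2^j is nonnegative, so Python's arithmetic shift is this division).
def sumLoopB : List Char → Nat → Int → Int
  | [], _, total => total
  | b :: rest, j, total =>
      sumLoopB rest (j + 1) (if b = '1' then total + (j : Int) * 2 ^ j / 2 else total)

def solve_alt (n : Int) : Int :=
  sumLoopB (if n = 0 then ['0'] else pyBinLSB n) 0 n

-- ===== PRECONDITION & SPEC =====
-- Pre_ excludes negative n, on which the Python A never terminates.
def Pre_solve (n : Int) : Prop := 0 ≤ n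
instance (n : Int) : Decidable (Pre_solve n) := by unfold Pre_solve; infer_instance
def pvWitness_solve : Int := 13

def Spec_solve (n : Int) (out : Int) : Prop := out = solve_alt n
instance (n : Int) (out : Int) : Decidable (Spec_solve n out) := by unfold Spec_solve; infer_instance

-- ===== CLAIM (what is proved, stated in full; the proofs are below) =====
def Claim_equal_solve : Prop := ∀ (n : Int), Dom_solve n → Pre_solve n → Spec_solve n (solve n)

-- ===== LEMMAS AND PROOFS =====

-- common mathematical specification: f(0)=0, f(n) = ceil(n/2) + 2 f(n/2) for n > 0
def fspec (n : Int) : Int :=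
  if h : n ≤ 0 then 0 else (n - n / 2) + 2 * fspec (n / 2)
  termination_by n.toNat
  decreasing_by simp; omega

theorem solveLoopA_eq (k : Nat) (n ans temp : Int) (hk : n.toNat = k) (hn : 0 ≤ n) :
    solveLoopA n ans temp = ans + temp * fspec n := by
  induction k using Nat.strong_induction_on generalizing n ans temp with
  | _ k ih =>
    by_cases h0 : n ≤ 0
    · have hz : n = 0 := le_antisymm h0 hn
      subst hz
      rw [solveLoopA, fspec]; simp
    · have hfd : PySem.Int.floordiv n 2 = n / 2 := PySem.Int.floordiv_eq_ediv_of_pos (by omega)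
      have hmd : PySem.Int.mod n 2 = n % 2 := PySem.Int.mod_eq_emod_of_pos (by omega)
      have hhalf : 0 ≤ n / 2 := by positivity
      have hlt : (n / 2).toNat < k := by omega
      rw [solveLoopA, dif_neg h0, hfd, hmd,
          ih (n / 2).toNat hlt _ _ _ rfl hhalf]
      have hfs : fspec n = (n - n / 2) + 2 * fspec (n / 2) := by
        conv_lhs => rw [fspec]
        rw [dif_neg h0]
      rw [hfs]
      have h2 : n / 2 * 2 + n % 2 = n := by omega
      by_cases hp : n % 2 = 0
      · rw [if_pos hp]; linear_combination (-temp) * hp + temp * h2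
      · rw [if_neg hp]
        have h1 : n % 2 = 1 := by omega
        linear_combination (-temp) * h1 + temp * h2

-- accumulator linearity of B's loop
theorem sumLoopB_acc (bs : List Char) (j : Nat) (t : Int) :
    sumLoopB bs j t = t + sumLoopB bs j 0 := by
  induction bs generalizing j t with
  | nil => simp [sumLoopB]
  | cons b rest ih =>
    simp only [sumLoopB]
    rw [ih (j + 1), ih (j + 1) (if b = '1' then (0 : Int) + _ else 0)]
    split_ifs <;> ring

-- the per-bit term satisfies term (j+1) = 2 * term j + 2^j
theorem term_succ (j : Nat) :
    (((j : Int) + 1) * 2 ^ (j + 1)) / 2 = 2 * ((j : Int) * 2 ^ j / 2) + 2 ^ j := by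
  cases j with
  | zero => decide
  | succ k =>
    have e1 : (((k : Int) + 1) + 1) * 2 ^ (k + 1 + 1) = 2 * ((((k : Int) + 1) + 1) * 2 ^ (k + 1)) := by
      ring
    have e2 : ((k : Int) + 1) * 2 ^ (k + 1) = 2 * (((k : Int) + 1) * 2 ^ k) := by ring
    push_cast
    rw [e1, Int.mul_ediv_cancel_left _ two_ne_zero, e2,
        Int.mul_ediv_cancel_left _ two_ne_zero]
    ring

-- shifting the starting index of B's loop by one doubles it and adds 2^j * value
def bitval : List Char → Int
  | [] => 0
  | b :: rest => (if b = '1' then 1 else 0) + 2 * bitval rest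

theorem sumLoopB_shift (bs : List Char) (j : Nat) :
    sumLoopB bs (j + 1) 0 = 2 * sumLoopB bs j 0 + 2 ^ j * bitval bs := by
  induction bs generalizing j with
  | nil => simp [sumLoopB, bitval]
  | cons b rest ih =>
    simp only [sumLoopB, bitval]
    rw [sumLoopB_acc rest (j + 2), sumLoopB_acc rest (j + 1), ih (j + 1)]
    have h1 : (↑(j + 1) : Int) * 2 ^ (j + 1) / 2 = 2 * ((j : Int) * 2 ^ j / 2) + 2 ^ j := by
      push_cast
      exact term_succ j
    have hp : (2 : Int) ^ (j + 1) = 2 ^ j * 2 := pow_succ 2 j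
    split_ifs with hb
    · rw [h1, hp]; ring
    · rw [hp]; ring

theorem bitval_pyBinLSB (k : Nat) (n : Int) (hk : n.toNat = k) (hn : 0 ≤ n) :
    bitval (pyBinLSB n) = n := by
  induction k using Nat.strong_induction_on generalizing n with
  | _ k ih =>
    by_cases h0 : n ≤ 0
    · have hz : n = 0 := le_antisymm h0 hn
      subst hz; rw [pyBinLSB]; simp [bitval]
    · have hfd : PySem.Int.floordiv n 2 = n / 2 := PySem.Int.floordiv_eq_ediv_of_pos (by omega)
      have hmd : PySem.Int.mod n 2 = n % 2 := PySem.Int.mod_eq_emod_of_pos (by omega)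
      have hhalf : 0 ≤ n / 2 := by positivity
      have hlt : (n / 2).toNat < k := by omega
      rw [pyBinLSB, if_neg h0, hfd, hmd]
      simp only [bitval]
      rw [ih (n / 2).toNat hlt _ rfl hhalf]
      by_cases hp : n % 2 = 1
      · rw [if_pos hp]; simp; omega
      · rw [if_neg hp]; simp; omega

theorem sumLoopB_pyBinLSB (k : Nat) (n : Int) (hk : n.toNat = k) (hn : 0 ≤ n) :
    sumLoopB (pyBinLSB n) 0 0 = fspec n - n := by
  induction k using Nat.strong_induction_on generalizing n with
  | _ k ih =>
    by_cases h0 : n ≤ 0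
    · have hz : n = 0 := le_antisymm h0 hn
      subst hz; rw [pyBinLSB, fspec]; simp [sumLoopB]
    · have hfd : PySem.Int.floordiv n 2 = n / 2 := PySem.Int.floordiv_eq_ediv_of_pos (by omega)
      have hmd : PySem.Int.mod n 2 = n % 2 := PySem.Int.mod_eq_emod_of_pos (by omega)
      have hhalf : 0 ≤ n / 2 := by positivity
      have hlt : (n / 2).toNat < k := by omega
      rw [pyBinLSB, if_neg h0, hfd, hmd]
      simp only [sumLoopB]
      have hterm : (if (if n % 2 = 1 then '1' else '0') = '1'
          then (0 : Int) + (0 : Nat) * 2 ^ (0 : Nat) / 2 else 0) = 0 := by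
        split_ifs <;> simp
      rw [hterm, sumLoopB_shift (pyBinLSB (n / 2)) 0,
          ih (n / 2).toNat hlt _ rfl hhalf,
          bitval_pyBinLSB (n / 2).toNat _ rfl hhalf]
      have hfs : fspec n = (n - n / 2) + 2 * fspec (n / 2) := by
        conv_lhs => rw [fspec]
        rw [dif_neg h0]
      rw [hfs]
      ring

-- ===== VERDICT (by name: the statement is the Claim_ definition above) =====
theorem solve_spec : Claim_equal_solve := by
  intro n _ hn
  unfold Spec_solve solve solve_alt
  rw [solveLoopA_eq n.toNat n 0 1 rfl hn]
  by_cases h0 : n = 0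
  · subst h0
    rw [fspec]
    simp [sumLoopB]
  · rw [if_neg h0, sumLoopB_acc, sumLoopB_pyBinLSB n.toNat n rfl hn]
    ring
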